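-- pv_equiv track=rewrite | github.com/MrBrantCode/unitest_baseline | mut_generate/mist_train_cf/cf_15358/solution.py | entance
-- ===== SOURCE A (Python) =====
-- def entance(arr):
--     low = 0
--     high = len(arr) - 1
--
--     while low <= high:
--         mid = (low + high) // 2
--
--         if arr[mid] == mid + arr[0]:
--             low = mid + 1
--         else:
--             high = mid - 1
--
--     return arr[low] - 1
-- ===== SOURCE B (Python) =====
-- def entance(arr):
--     def rec(base, length):
--         if length == 0:
--             return arr[base] - 1
--         k = (length - 1) // 2
--         if arr[base + k] == base + k + arr[0]:
--             return rec(base + k + 1, length - 1 - k)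
--         return rec(base, k)
--     return rec(0, len(arr))
-- ===== Notes on version B (the rewrite author's own statement) =====
-- stated objective: alternative
-- what changed: Replaces A's imperative while-loop over mutable (low, high) bounds by a recursive divide-and-conquer helper parametrised by (base, length) of the remaining segment, deriving the probe index as base + (length-1)//2.
import Mathlib
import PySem

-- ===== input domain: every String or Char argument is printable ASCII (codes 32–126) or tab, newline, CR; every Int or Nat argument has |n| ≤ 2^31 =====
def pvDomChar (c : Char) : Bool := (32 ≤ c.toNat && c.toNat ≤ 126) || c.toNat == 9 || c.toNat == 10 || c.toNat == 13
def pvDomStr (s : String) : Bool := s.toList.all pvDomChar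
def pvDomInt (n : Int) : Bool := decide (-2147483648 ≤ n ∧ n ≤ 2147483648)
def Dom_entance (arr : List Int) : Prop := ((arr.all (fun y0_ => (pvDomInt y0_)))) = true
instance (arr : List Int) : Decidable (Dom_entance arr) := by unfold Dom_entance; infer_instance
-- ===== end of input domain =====

-- B replaces A's while-loop over (low, high) by a recursive helper over (base, length); same probes, same result.

-- ===== PORT A =====
-- while low <= high: … ; indexing via pyGetD (the default is unreachable under Pre_entance)
def entanceLoop (arr : List Int) (low high : Int) : Int :=
  if low ≤ high then
    let mid := PySem.Int.floordiv (low + high) 2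
    if PySem.List.pyGetD arr mid 0 = mid + PySem.List.pyGetD arr 0 0 then
      entanceLoop arr (mid + 1) high
    else
      entanceLoop arr low (mid - 1)
  else
    PySem.List.pyGetD arr low 0 - 1
termination_by (high + 1 - low).toNat
decreasing_by
  · have h := PySem.Int.floordiv_two_mid_bounds (by assumption : low ≤ high)
    omega
  · have h := PySem.Int.floordiv_two_mid_bounds (by assumption : low ≤ high)
    omega

def entance (arr : List Int) : Int :=
  entanceLoop arr 0 ((arr.length : Int) - 1)

-- ===== PORT B =====
-- rec(base, length): length = 0 → arr[base] - 1; else k = (length-1)//2 and recurse on the half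
def entanceRec (arr : List Int) (base : Int) : Nat → Int
  | 0 => PySem.List.pyGetD arr base 0 - 1
  | (m + 1) =>
    let k := m / 2
    if PySem.List.pyGetD arr (base + (k : Int)) 0 = base + (k : Int) + PySem.List.pyGetD arr 0 0 then
      entanceRec arr (base + (k : Int) + 1) (m - k)
    else
      entanceRec arr base k
termination_by n => n
decreasing_by all_goals omega

def entance_alt (arr : List Int) : Int :=
  entanceRec arr 0 arr.length

-- ===== PRECONDITION & SPEC =====
-- pvChain n: the indices A probes while high is still len-1 (the always-right probe chain); depends only on n
def pvChainAux : Nat → Nat → Nat → List Nat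
  | 0, _, _ => []
  | fuel + 1, low, n =>
    if low < n then
      ((low + n - 1) / 2) :: pvChainAux fuel ((low + n - 1) / 2 + 1) n
    else []

def pvChain (low n : Nat) : List Nat := pvChainAux (n - low) low n

-- Pre_ excludes exactly the inputs on which A raises IndexError: the empty list, and arrays whose
-- every index i on the always-right probe chain has the value i plus the first element (then low overruns the array).
def Pre_entance (arr : List Int) : Prop :=
  arr ≠ [] ∧ ∃ i ∈ pvChain 0 arr.length, arr.getD i 0 ≠ (i : Int) + arr.getD 0 0
instance (arr : List Int) : Decidable (Pre_entance arr) := by unfold Pre_entance; infer_instance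

def pvWitness_entance : List Int := [0, 5]

def Spec_entance (arr : List Int) (out : Int) : Prop := out = entance_alt arr
instance (arr : List Int) (out : Int) : Decidable (Spec_entance arr out) := by unfold Spec_entance; infer_instance

-- ===== CLAIM (what is proved, stated in full; the proofs are below) =====
def Claim_equal_entance : Prop := ∀ (arr : List Int), Dom_entance arr → Pre_entance arr → Spec_entance arr (entance arr)

-- ===== LEMMAS AND PROOFS =====

theorem loop_eq_rec (arr : List Int) (len : Nat) : ∀ low : Int, 0 ≤ low →
    entanceLoop arr low (low + (len : Int) - 1) = entanceRec arr low len := by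
  induction len using Nat.strong_induction_on with
  | _ len IH =>
    intro low hlow
    match len with
    | 0 =>
      rw [entanceLoop]
      simp only [Nat.cast_zero]
      rw [if_neg (by omega), entanceRec]
    | m + 1 =>
      rw [entanceLoop]
      have hle : low ≤ low + ((m + 1 : Nat) : Int) - 1 := by push_cast; omega
      rw [if_pos hle]
      have hfd : PySem.Int.floordiv (low + (low + ((m + 1 : Nat) : Int) - 1)) 2
          = low + ((m / 2 : Nat) : Int) := by
        rw [PySem.Int.floordiv_eq_ediv_of_pos (by omega)]
        push_cast
        omega
      rw [hfd]
      show (if PySem.List.pyGetD arr (low + ((m / 2 : Nat) : Int)) 0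
              = low + ((m / 2 : Nat) : Int) + PySem.List.pyGetD arr 0 0 then
              entanceLoop arr (low + ((m / 2 : Nat) : Int) + 1) (low + ((m + 1 : Nat) : Int) - 1)
            else
              entanceLoop arr low (low + ((m / 2 : Nat) : Int) - 1)) = _
      rw [entanceRec]
      by_cases hc : PySem.List.pyGetD arr (low + ((m / 2 : Nat) : Int)) 0
          = low + ((m / 2 : Nat) : Int) + PySem.List.pyGetD arr 0 0
      · rw [if_pos hc, if_pos hc]
        have h1 : low + ((m + 1 : Nat) : Int) - 1
            = (low + ((m / 2 : Nat) : Int) + 1) + ((m - m / 2 : Nat) : Int) - 1 := by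
          push_cast [Nat.cast_sub (Nat.div_le_self m 2)]; omega
        rw [h1]
        exact IH (m - m / 2) (by omega) _ (by omega)
      · rw [if_neg hc, if_neg hc]
        exact (by simpa using IH (m / 2) (by omega) low hlow : entanceLoop arr low (low + ((m / 2 : Nat) : Int) - 1) = entanceRec arr low (m / 2))

-- ===== VERDICT (by name: the statement is the Claim_ definition above) =====
theorem entance_spec : Claim_equal_entance := by
  intro arr _ _
  unfold Spec_entance entance entance_alt
  have h := loop_eq_rec arr arr.length 0 le_rfl
  simpa using h
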